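-- pv_equiv track=rewrite | github.com/rileymotylinski/umn | csci1913/python/labs/lab2 - nim/nim.py | create_game_state
-- ===== SOURCE A (Python) =====
-- def create_game_state(size: int,token_max: int) -> list:
--     '''
--     creates a nim game board w/ appropriate number of tokens
--
--     Args:
--     size      -- int -- how many rows are in the game board
--     token_max -- int -- max number of tokens to be reached
--
--     Returns:
--     list -- created game board of sizexsize size
--
--     '''
--
--     board = []
--
--     # number of rows is [1,size], inclusive
--     for i in range(1,size+1):
--         # adding ascending number of tokens
--         if i < token_max:
--             board.append(i)
--
--         # if i reaches token_max before size, then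
--         # begin appending max number of tokens
--         else:
--             board.append(token_max)
--     return board
-- ===== SOURCE B (Python) =====
-- def create_game_state(size: int, token_max: int) -> list:
--     ascending = list(range(1, min(size + 1, token_max)))
--     return ascending + [token_max] * (size - len(ascending))
-- ===== Notes on version B (the rewrite author's own statement) =====
-- stated objective: simpler
-- what changed: Replaces the per-row loop with a branch by two arithmetic segments: a range for the ascending prefix and a list-repetition for the capped tail.
import Mathlib
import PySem

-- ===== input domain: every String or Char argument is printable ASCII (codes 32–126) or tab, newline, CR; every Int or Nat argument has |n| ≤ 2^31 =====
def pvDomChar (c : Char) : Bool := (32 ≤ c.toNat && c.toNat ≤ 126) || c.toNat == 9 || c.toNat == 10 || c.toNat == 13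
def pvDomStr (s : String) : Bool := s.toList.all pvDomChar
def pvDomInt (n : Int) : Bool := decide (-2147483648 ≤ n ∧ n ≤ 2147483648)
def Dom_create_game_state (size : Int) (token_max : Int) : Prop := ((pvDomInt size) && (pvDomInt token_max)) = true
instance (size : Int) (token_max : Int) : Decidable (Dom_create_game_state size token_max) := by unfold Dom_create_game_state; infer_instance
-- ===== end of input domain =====

-- B builds the board as two arithmetic segments (ascending range + repeated cap) instead of A's per-row loop with a branch; objective: simpler.

-- ===== PORT A =====
def create_game_state (size : Int) (token_max : Int) : List Int :=
  (PySem.List.pyRange 1 (size + 1) 1).foldl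
    (fun board i => if i < token_max then board ++ [i] else board ++ [token_max]) []

-- ===== PORT B =====
def create_game_state_alt (size : Int) (token_max : Int) : List Int :=
  let ascending := PySem.List.pyRange 1 (min (size + 1) token_max) 1
  ascending ++ List.replicate (size - (ascending.length : Int)).toNat token_max

-- ===== PRECONDITION & SPEC =====
def Spec_create_game_state (size : Int) (token_max : Int) (out : List Int) : Prop := out = create_game_state_alt size token_max
instance (size : Int) (token_max : Int) (out : List Int) : Decidable (Spec_create_game_state size token_max out) := by unfold Spec_create_game_state; infer_instance

-- ===== CLAIM (what is proved, stated in full; the proofs are below) =====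
def Claim_equal_create_game_state : Prop := ∀ (size : Int) (token_max : Int), Dom_create_game_state size token_max → Spec_create_game_state size token_max (create_game_state size token_max)

-- ===== LEMMAS AND PROOFS =====

-- A's loop is a map of the branch over the row indices
theorem create_game_state_eq_map (size token_max : Int) :
    create_game_state size token_max =
      (PySem.List.pyRange 1 (size + 1) 1).map
        (fun i => if i < token_max then i else token_max) := by
  unfold create_game_state
  have hfun : (fun (board : List Int) i =>
      if i < token_max then board ++ [i] else board ++ [token_max])
      = fun board i => board ++ [if i < token_max then i else token_max] := by
    funext b i; by_cases h : i < token_max <;> simp [h]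
  rw [hfun, PySem.List.foldl_append_singleton_eq_map]
  simp

-- B unfolded, with the ascending length written arithmetically
theorem create_game_state_alt_eq (size token_max : Int) :
    create_game_state_alt size token_max =
      PySem.List.pyRange 1 (min (size + 1) token_max) 1 ++
        List.replicate (size - ((min (size + 1) token_max - 1).toNat : Int)).toNat token_max := by
  show PySem.List.pyRange 1 (min (size + 1) token_max) 1 ++
      List.replicate
        (size - ((PySem.List.pyRange 1 (min (size + 1) token_max) 1).length : Int)).toNat
        token_max = _
  rw [PySem.List.length_pyRange_one]

theorem create_game_state_spec_aux (size token_max : Int) :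
    create_game_state size token_max = create_game_state_alt size token_max := by
  rw [create_game_state_eq_map, create_game_state_alt_eq]
  by_cases hbig : size + 1 ≤ token_max
  · -- cap never reached: the whole board is the ascending range
    have hmin : min (size + 1) token_max = size + 1 := min_eq_left hbig
    rw [hmin]
    have hmap : ∀ i ∈ PySem.List.pyRange 1 (size + 1) 1,
        (if i < token_max then i else token_max) = id i := by
      intro i hi
      have := (PySem.List.mem_pyRange_one.mp hi).2
      simp [show i < token_max by omega]
    rw [List.map_congr_left hmap, List.map_id,
      show (size - ((size + 1 - 1).toNat : Int)).toNat = 0 by omega]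
    simp
  · -- token_max ≤ size
    have hmin : min (size + 1) token_max = token_max := min_eq_right (by omega)
    rw [hmin]
    by_cases hpos : 1 ≤ token_max
    · -- split the rows at token_max
      rw [PySem.List.pyRange_one_append 1 token_max (size + 1) hpos (by omega),
        List.map_append]
      congr 1
      · -- ascending part: i < token_max throughout
        have h : ∀ i ∈ PySem.List.pyRange 1 token_max 1,
            (if i < token_max then i else token_max) = id i := by
          intro i hi
          have := (PySem.List.mem_pyRange_one.mp hi).2
          simp [this]
        rw [List.map_congr_left h, List.map_id]
      · -- capped part: i ≥ token_max throughout
        have h : ∀ i ∈ PySem.List.pyRange token_max (size + 1) 1,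
            (if i < token_max then i else token_max) = (fun _ => token_max) i := by
          intro i hi
          have := (PySem.List.mem_pyRange_one.mp hi).1
          simp [show ¬ i < token_max by omega]
        rw [List.map_congr_left h, List.map_const', PySem.List.length_pyRange_one]
        congr 1
        omega
    · -- token_max ≤ 0: every row holds token_max
      rw [PySem.List.pyRange_one_eq_nil (by omega : token_max ≤ 1)]
      have h : ∀ i ∈ PySem.List.pyRange 1 (size + 1) 1,
          (if i < token_max then i else token_max) = (fun _ => token_max) i := by
        intro i hi
        have := (PySem.List.mem_pyRange_one.mp hi).1
        simp [show ¬ i < token_max by omega]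
      rw [List.map_congr_left h, List.map_const', PySem.List.length_pyRange_one]
      simp
      omega

-- ===== VERDICT (by name: the statement is the Claim_ definition above) =====
theorem create_game_state_spec : Claim_equal_create_game_state := by
  intro size token_max _
  exact create_game_state_spec_aux size token_max
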